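-- pv_equiv track=rewrite | github.com/MrChepe09/Competitive-Programming-Codes | A2OJ/Ladder 0-1300/xenia_and_ringroad.py | ringroad
-- ===== SOURCE A (Python) =====
-- def ringroad(n, m, a):
--     res = 0
--     prev = 1
--     for i in a:
--         if(i>prev):
--             res+= i-prev
--             prev = i
--         elif(i<prev):
--             res += (n-prev)+i
--             prev = i
--     return res
-- ===== SOURCE B (Python) =====
-- def ringroad(n, m, a):
--     seq = [1] + list(a)
--     dec = sum(1 for x, y in zip(seq, seq[1:]) if y < x)
--     return (seq[-1] - seq[0]) + n * dec
-- ===== Notes on version B (the rewrite author's own statement) =====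
-- stated objective: simpler
-- what changed: Replaces A's stateful loop (tracking prev and branching three ways) with a closed-form telescoped difference seq[-1]-seq[0] plus n times a single count of strict decreases over the [1]-prefixed sequence.
import Mathlib
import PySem

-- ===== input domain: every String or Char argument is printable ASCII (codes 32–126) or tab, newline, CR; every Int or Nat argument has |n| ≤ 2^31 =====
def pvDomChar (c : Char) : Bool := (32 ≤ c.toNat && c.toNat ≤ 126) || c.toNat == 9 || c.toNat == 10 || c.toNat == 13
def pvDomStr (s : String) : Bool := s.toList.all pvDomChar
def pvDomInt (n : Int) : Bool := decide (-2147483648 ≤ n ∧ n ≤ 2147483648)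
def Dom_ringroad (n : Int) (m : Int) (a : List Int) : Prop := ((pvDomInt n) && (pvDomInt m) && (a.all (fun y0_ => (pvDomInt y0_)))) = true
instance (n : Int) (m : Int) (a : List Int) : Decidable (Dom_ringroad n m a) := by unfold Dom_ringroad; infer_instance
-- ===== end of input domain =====

-- B replaces A's stateful prev-tracking loop by a telescoped closed form plus a single count of strict decreases (objective: simpler).


-- ===== PORT A =====
def ringroad (n : Int) (m : Int) (a : List Int) : Int :=
  (a.foldl (fun (st : Int × Int) i =>
      if i > st.2 then (st.1 + (i - st.2), i)
      else if i < st.2 then (st.1 + ((n - st.2) + i), i)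
      else st) (0, 1)).1

-- ===== PORT B =====
-- count of adjacent pairs (x, y) in the list with y < x (Source B's sum over zip(seq, seq[1:]))
def decCount : List Int → Int
  | x :: y :: rest => (if y < x then 1 else 0) + decCount (y :: rest)
  | _ => 0

def ringroad_alt (n : Int) (m : Int) (a : List Int) : Int :=
  let seq : List Int := 1 :: a
  (seq.getLast (by simp) - seq.head (by simp)) + n * decCount seq

-- ===== PRECONDITION & SPEC =====
def Spec_ringroad (n : Int) (m : Int) (a : List Int) (out : Int) : Prop := out = ringroad_alt n m a
instance (n : Int) (m : Int) (a : List Int) (out : Int) : Decidable (Spec_ringroad n m a out) := by unfold Spec_ringroad; infer_instance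

-- ===== CLAIM (what is proved, stated in full; the proofs are below) =====
def Claim_equal_ringroad : Prop := ∀ (n : Int) (m : Int) (a : List Int), Dom_ringroad n m a → Spec_ringroad n m a (ringroad n m a)

-- ===== LEMMAS AND PROOFS =====

theorem ringroad_loop (n : Int) (a : List Int) :
    ∀ (res prev : Int),
      (a.foldl (fun (st : Int × Int) i =>
        if i > st.2 then (st.1 + (i - st.2), i)
        else if i < st.2 then (st.1 + ((n - st.2) + i), i)
        else st) (res, prev)).1
      = res + ((prev :: a).getLast (by simp) - prev) + n * decCount (prev :: a) := by
  induction a with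
  | nil => intro res prev; simp [decCount]
  | cons i rest ih =>
    intro res prev
    simp only [List.foldl_cons]
    rcases lt_trichotomy prev i with h | h | h
    · rw [if_pos (by simpa using h)]
      rw [ih]
      have hlast : (prev :: i :: rest).getLast (by simp) = (i :: rest).getLast (by simp) :=
        List.getLast_cons _
      rw [hlast]
      simp only [decCount]
      rw [if_neg (by omega)]
      ring
    · subst h
      rw [if_neg (by omega), if_neg (by omega)]
      rw [ih]
      have hlast : (prev :: prev :: rest).getLast (by simp) = (prev :: rest).getLast (by simp) :=
        List.getLast_cons _
      rw [hlast]
      simp only [decCount]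
      rw [if_neg (by omega)]
      ring
    · rw [if_neg (by omega), if_pos (by simpa using h)]
      rw [ih]
      have hlast : (prev :: i :: rest).getLast (by simp) = (i :: rest).getLast (by simp) :=
        List.getLast_cons _
      rw [hlast]
      simp only [decCount]
      rw [if_pos (by omega)]
      ring

-- ===== VERDICT (by name: the statement is the Claim_ definition above) =====
theorem ringroad_spec : Claim_equal_ringroad := by
  intro n m a _
  unfold Spec_ringroad ringroad ringroad_alt
  rw [ringroad_loop]
  simp
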